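-- pv_equiv track=rewrite | github.com/MaxOrtGit/VCTPB-SQL-transfer | vst/vst/DBMatch.py | is_valid_bet
-- ===== SOURCE A (Python) =====
-- def is_valid_bet(code, t1, t2, tournament_name, amount_bet, team_num, color, match_id, user_id, date_created):
--   errors = [False for _ in range(10)]
--   if len(code) != 8 or isinstance(code, str) == False:
--     errors[0] = True
--   if len(t1) > 50 or isinstance(t1, str) == False:
--     errors[1] = True
--   if len(t2) > 50 or isinstance(t2, str) == False:
--     errors[2] = True
--   if len(tournament_name) > 100 or isinstance(tournament_name, str) == False:
--     errors[3] = True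
--   if isinstance(amount_bet, int) == False or amount_bet < 1:
--     errors[4] = True
--   if isinstance(team_num, int) == False or team_num < 1 or team_num > 2:
--     errors[5] = True
--   if len(color) > 6 or isinstance(color, str) == False:
--     errors[6] = True
--   if len(match_id) != 8 or isinstance(match_id, str) == False:
--     errors[7] = True
--   if isinstance(user_id, int) == False:
--     errors[8] = True
--   if isinstance(date_created, str) == False:
--     errors[9] = True
--
--   return errors
-- ===== SOURCE B (Python) =====
-- def _failed(spec):
--     kind, v = spec[0], spec[1]
--     if kind == 'str_exact':
--         return len(v) != spec[2] or not isinstance(v, str)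
--     if kind == 'str_max':
--         return len(v) > spec[2] or not isinstance(v, str)
--     if kind == 'int_min':
--         return not isinstance(v, int) or v < spec[2]
--     if kind == 'int_range':
--         return not isinstance(v, int) or v < spec[2] or v > spec[3]
--     if kind == 'int_any':
--         return not isinstance(v, int)
--     return not isinstance(v, str)   # 'str_any'
--
-- def is_valid_bet(code, t1, t2, tournament_name, amount_bet, team_num, color, match_id, user_id, date_created):
--     specs = [
--         ('str_exact', code, 8),
--         ('str_max', t1, 50),
--         ('str_max', t2, 50),
--         ('str_max', tournament_name, 100),
--         ('int_min', amount_bet, 1),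
--         ('int_range', team_num, 1, 2),
--         ('str_max', color, 6),
--         ('str_exact', match_id, 8),
--         ('int_any', user_id),
--         ('str_any', date_created),
--     ]
--     return [_failed(s) for s in specs]
-- ===== Notes on version B (the rewrite author's own statement) =====
-- stated objective: idiomatic
-- what changed: Replaces the ten straight-line mutate-a-preallocated-list statements with a declarative per-field spec table and one traversal mapping a generic failed() checker over it.
import Mathlib
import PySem

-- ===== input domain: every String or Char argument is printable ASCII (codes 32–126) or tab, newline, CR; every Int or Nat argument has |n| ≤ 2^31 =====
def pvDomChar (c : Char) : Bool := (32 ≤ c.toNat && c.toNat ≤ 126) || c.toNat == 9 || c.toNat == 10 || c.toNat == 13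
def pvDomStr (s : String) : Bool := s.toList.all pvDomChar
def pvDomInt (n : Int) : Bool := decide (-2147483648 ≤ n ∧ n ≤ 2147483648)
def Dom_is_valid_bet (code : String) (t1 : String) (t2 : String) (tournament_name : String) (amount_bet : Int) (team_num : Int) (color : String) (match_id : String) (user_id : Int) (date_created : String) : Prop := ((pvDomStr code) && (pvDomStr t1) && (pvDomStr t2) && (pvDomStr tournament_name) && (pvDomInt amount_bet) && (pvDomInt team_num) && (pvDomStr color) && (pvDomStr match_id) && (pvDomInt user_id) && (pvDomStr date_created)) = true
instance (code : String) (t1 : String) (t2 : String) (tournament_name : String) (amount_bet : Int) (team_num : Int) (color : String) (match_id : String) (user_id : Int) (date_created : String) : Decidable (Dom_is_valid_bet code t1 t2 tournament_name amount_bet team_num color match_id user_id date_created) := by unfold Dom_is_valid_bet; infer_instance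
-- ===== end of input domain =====

-- B replaces the ten mutate-in-place validation statements with a per-field spec table and one map of a generic checker (idiomatic rewrite, same cost).


-- ===== PORT A =====
-- A mutates a preallocated 10-slot list; each `isinstance(x, T) == False` test is
-- identically False under the typed convention (the arguments have those types) and is
-- ported as the literal `False` disjunct in the same position.
def is_valid_bet (code : String) (t1 : String) (t2 : String) (tournament_name : String) (amount_bet : Int) (team_num : Int) (color : String) (match_id : String) (user_id : Int) (date_created : String) : List Bool :=
  let errors := (PySem.List.pyRange 0 10 1).map (fun _ => false)
  let errors := if PySem.Str.len code ≠ 8 ∨ False then errors.set 0 true else errors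
  let errors := if PySem.Str.len t1 > 50 ∨ False then errors.set 1 true else errors
  let errors := if PySem.Str.len t2 > 50 ∨ False then errors.set 2 true else errors
  let errors := if PySem.Str.len tournament_name > 100 ∨ False then errors.set 3 true else errors
  let errors := if False ∨ amount_bet < 1 then errors.set 4 true else errors
  let errors := if False ∨ team_num < 1 ∨ team_num > 2 then errors.set 5 true else errors
  let errors := if PySem.Str.len color > 6 ∨ False then errors.set 6 true else errors
  let errors := if PySem.Str.len match_id ≠ 8 ∨ False then errors.set 7 true else errors
  let errors := if (False : Prop) then errors.set 8 true else errors
  let errors := if (False : Prop) then errors.set 9 true else errors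
  errors

-- ===== PORT B =====
-- B: a declarative spec table, one checker mapped over it.  The `not isinstance`
-- disjuncts of Source B are identically false under the typed convention and are ported
-- as the literal `false` in the same position.
inductive BetSpec : Type
  | strExact : String → Int → BetSpec
  | strMax   : String → Int → BetSpec
  | intMin   : Int → Int → BetSpec
  | intRange : Int → Int → Int → BetSpec
  | intAny   : Int → BetSpec
  | strAny   : String → BetSpec
  deriving DecidableEq, Repr

def betFailed : BetSpec → Bool
  | .strExact v n      => decide (PySem.Str.len v ≠ n) || false
  | .strMax v n        => decide (PySem.Str.len v > n) || false
  | .intMin v n        => false || decide (v < n)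
  | .intRange v lo hi  => false || decide (v < lo) || decide (v > hi)
  | .intAny _          => false
  | .strAny _          => false

def is_valid_bet_alt (code : String) (t1 : String) (t2 : String) (tournament_name : String) (amount_bet : Int) (team_num : Int) (color : String) (match_id : String) (user_id : Int) (date_created : String) : List Bool :=
  let specs : List BetSpec :=
    [ .strExact code 8,
      .strMax t1 50,
      .strMax t2 50,
      .strMax tournament_name 100,
      .intMin amount_bet 1,
      .intRange team_num 1 2,
      .strMax color 6,
      .strExact match_id 8,
      .intAny user_id,
      .strAny date_created ]
  specs.map betFailed

-- ===== PRECONDITION & SPEC =====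
def Spec_is_valid_bet (code : String) (t1 : String) (t2 : String) (tournament_name : String) (amount_bet : Int) (team_num : Int) (color : String) (match_id : String) (user_id : Int) (date_created : String) (out : List Bool) : Prop := out = is_valid_bet_alt code t1 t2 tournament_name amount_bet team_num color match_id user_id date_created
instance (code : String) (t1 : String) (t2 : String) (tournament_name : String) (amount_bet : Int) (team_num : Int) (color : String) (match_id : String) (user_id : Int) (date_created : String) (out : List Bool) : Decidable (Spec_is_valid_bet code t1 t2 tournament_name amount_bet team_num color match_id user_id date_created out) := by unfold Spec_is_valid_bet; infer_instance

-- ===== CLAIM (what is proved, stated in full; the proofs are below) =====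
def Claim_equal_is_valid_bet : Prop := ∀ (code : String) (t1 : String) (t2 : String) (tournament_name : String) (amount_bet : Int) (team_num : Int) (color : String) (match_id : String) (user_id : Int) (date_created : String), Dom_is_valid_bet code t1 t2 tournament_name amount_bet team_num color match_id user_id date_created → Spec_is_valid_bet code t1 t2 tournament_name amount_bet team_num color match_id user_id date_created (is_valid_bet code t1 t2 tournament_name amount_bet team_num color match_id user_id date_created)

-- ===== LEMMAS AND PROOFS =====

theorem pv_if_set (c : Prop) [Decidable c] (l : List Bool) (i : Nat) :
    (if c then l.set i true else l) = l.set i (l.getD i false || decide c) := by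
  have hself : l.set i (l[i]?.getD false) = l := by
    by_cases hi : i < l.length
    · have h : l[i]?.getD false = l[i] := by simp [List.getElem?_eq_getElem hi]
      rw [h]
      exact List.set_getElem_self hi
    · exact List.set_eq_of_length_le (by omega)
  by_cases hc : c <;> simp [hc, List.getD, hself]

-- ===== VERDICT (by name: the statement is the Claim_ definition above) =====
theorem is_valid_bet_spec : Claim_equal_is_valid_bet := by
  intro code t1 t2 tournament_name amount_bet team_num color match_id user_id date_created _
  unfold Spec_is_valid_bet is_valid_bet is_valid_bet_alt
  show _ = _
  have hbase : (PySem.List.pyRange 0 10 1).map (fun _ => (false : Bool)) = [false, false, false, false, false, false, false, false, false, false] := by rfl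
  rw [hbase]
  simp only [if_false]
  rw [pv_if_set, pv_if_set, pv_if_set, pv_if_set, pv_if_set, pv_if_set, pv_if_set, pv_if_set]
  simp [betFailed, List.set]
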